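-- pv_equiv track=rewrite | github.com/simplymadeai/exotic-telemetry-agent | api/rca.py | _is_upstream
-- ===== SOURCE A (Python) =====
-- def _is_upstream(u,v,parents):
--     seen=set(); stack=[v]
--     while stack:
--         cur=stack.pop()
--         for p in parents.get(cur,[]):
--             if p==u: return True
--             if p not in seen: seen.add(p); stack.append(p)
--     return False
-- ===== SOURCE B (Python) =====
-- def _is_upstream(u, v, parents):
--     # level-synchronous BFS closure: expand whole frontier each round,
--     # then test membership of u in the accumulated ancestor set
--     anc = set()
--     frontier = [v]
--     while frontier:
--         new = {p for c in frontier for p in parents.get(c, [])} - anc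
--         anc |= new
--         frontier = new
--     return u in anc
-- ===== Notes on version B (the rewrite author's own statement) =====
-- stated objective: alternative
-- what changed: A's one-node-at-a-time DFS with an explicit stack and per-node seen bookkeeping is replaced by a level-synchronous BFS closure: each round expands the whole frontier at once via a set comprehension, subtracts the already-known ancestors, and finally tests membership of u.
import Mathlib
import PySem

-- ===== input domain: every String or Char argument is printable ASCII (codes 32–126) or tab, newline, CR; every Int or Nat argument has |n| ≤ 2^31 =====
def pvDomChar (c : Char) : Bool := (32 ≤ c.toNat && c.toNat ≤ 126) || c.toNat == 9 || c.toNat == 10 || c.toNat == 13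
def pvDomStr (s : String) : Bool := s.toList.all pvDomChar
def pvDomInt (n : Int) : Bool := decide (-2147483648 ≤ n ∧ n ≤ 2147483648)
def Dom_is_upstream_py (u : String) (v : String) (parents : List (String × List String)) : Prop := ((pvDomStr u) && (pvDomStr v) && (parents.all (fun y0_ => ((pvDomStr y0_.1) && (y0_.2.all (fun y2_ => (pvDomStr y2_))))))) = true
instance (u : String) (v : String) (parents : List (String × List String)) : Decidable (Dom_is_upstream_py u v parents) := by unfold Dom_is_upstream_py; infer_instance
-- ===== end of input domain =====

-- B replaces A's one-node-at-a-time DFS stack with a level-synchronous BFS closure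
-- (expand the whole frontier each round, then test membership of u); alternative algorithm, same result.

-- parents.get(c, []) — shared helper: both Pythons contain this exact expression
def pvGet (parents : List (String × List String)) (c : String) : List String :=
  PySem.Dict.getD (PySem.Dict.mk parents) c []

-- all strings that occur in some parent list (the universe both searches stay inside);
-- used only to compute a provably sufficient fuel bound for the loops below
def pvAllD (parents : List (String × List String)) : List String :=
  PySem.Set.ofList (parents.flatMap (fun pr => pr.2))

-- ===== PORT A =====
-- inner 'for p in parents.get(cur, [])' loop: none = 'return True', some = updated (seen, stack)
def innerA (u : String) : List String → List String → List String → Option (List String × List String)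
  | [], seen, stack => some (seen, stack)
  | p :: ps, seen, stack =>
    if p = u then none
    else if PySem.Set.contains seen p then innerA u ps seen stack
    else innerA u ps (PySem.Set.add seen p) (p :: stack)

-- 'while stack:' loop; the stack's head is Python's last element (pop/append at the head).
-- fuel is only a totality guard: it is proved unreachable (loopA_iff) for the fuel is_upstream_py supplies
def loopA (u : String) (parents : List (String × List String)) : Nat → List String → List String → Bool
  | _, _, [] => false
  | 0, _, _ :: _ => false
  | fuel + 1, seen, cur :: rest =>
    match innerA u (pvGet parents cur) seen rest with
    | none => true
    | some (seen', stack') => loopA u parents fuel seen' stack'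

def is_upstream_py (u : String) (v : String) (parents : List (String × List String)) : Bool :=
  loopA u parents (2 * (pvAllD parents).length + 2) [] [v]

-- ===== PORT B =====
-- 'while frontier:' loop of Source B; fuel is only a totality guard, proved unreachable (loopB_iff)
def loopB (u : String) (parents : List (String × List String)) : Nat → List String → List String → Bool
  | _, anc, [] => PySem.Set.contains anc u
  | 0, _, _ :: _ => false
  | fuel + 1, anc, f :: fs =>
    let nw := PySem.Set.diff (PySem.Set.ofList ((f :: fs).flatMap (fun c => pvGet parents c))) anc
    loopB u parents fuel (PySem.Set.update anc nw) nw

def is_upstream_py_alt (u : String) (v : String) (parents : List (String × List String)) : Bool :=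
  loopB u parents ((pvAllD parents).length + 1) [] [v]

-- ===== PRECONDITION & SPEC =====
def Spec_is_upstream_py (u : String) (v : String) (parents : List (String × List String)) (out : Bool) : Prop := out = is_upstream_py_alt u v parents
instance (u : String) (v : String) (parents : List (String × List String)) (out : Bool) : Decidable (Spec_is_upstream_py u v parents out) := by unfold Spec_is_upstream_py; infer_instance

-- ===== CLAIM (what is proved, stated in full; the proofs are below) =====
def Claim_equal_is_upstream_py : Prop := ∀ (u : String) (v : String) (parents : List (String × List String)), Dom_is_upstream_py u v parents → Spec_is_upstream_py u v parents (is_upstream_py u v parents)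

-- ===== LEMMAS AND PROOFS =====

-- one parent-edge step, and reachability in ≥ 1 step (what both programs decide)
def pvEdge (parents : List (String × List String)) (a b : String) : Prop := b ∈ pvGet parents a
def pvReach (parents : List (String × List String)) (a b : String) : Prop :=
  Relation.TransGen (pvEdge parents) a b

lemma pvGet_cases (parents : List (String × List String)) (c : String) :
    pvGet parents c = [] ∨ ∃ pr ∈ parents, pvGet parents c = pr.2 := by
  induction parents with
  | nil => left; rfl
  | cons pr rest ih =>
    obtain ⟨k, vs⟩ := pr
    simp only [pvGet, PySem.Dict.getD_eq_get?_getD] at *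
    rw [PySem.Dict.get?_mk_cons]
    by_cases hk : (k == c) = true
    · right; exact ⟨(k, vs), List.mem_cons_self .., by simp [hk]⟩
    · rcases ih with h | ⟨pr', hpr', he⟩
      · left; simp [hk, h]
      · right; exact ⟨pr', List.mem_cons_of_mem _ hpr', by simp [hk, he]⟩

lemma mem_pvAllD {parents : List (String × List String)} {c p : String}
    (h : p ∈ pvGet parents c) : p ∈ pvAllD parents := by
  rcases pvGet_cases parents c with h0 | ⟨pr, hpr, he⟩
  · rw [h0] at h; cases h
  · rw [he] at h
    exact (PySem.Set.mem_ofList _ _).mpr (List.mem_flatMap.mpr ⟨pr, hpr, h⟩)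

lemma pvNodup_length_le {l L : List String} (h : l.Nodup) (h2 : ∀ x ∈ l, x ∈ L) :
    l.length ≤ L.length :=
  (List.Nodup.subperm h h2).length_le

lemma innerA_none_iff (u : String) :
    ∀ ps seen stack, innerA u ps seen stack = none ↔ u ∈ ps := by
  intro ps
  induction ps with
  | nil => intro seen stack; simp [innerA]
  | cons p ps ih =>
    intro seen stack
    simp only [innerA]
    by_cases hpu : p = u
    · simp [hpu]
    · by_cases hm : p ∈ seen <;>
        simp [hpu, hm, ih, List.mem_cons, Ne.symm hpu]

lemma innerA_some (u : String) :
    ∀ ps seen stack s' k', innerA u ps seen stack = some (s', k') →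
      (∀ x, x ∈ s' ↔ x ∈ seen ∨ x ∈ ps) ∧
      (∀ x, x ∈ k' ↔ x ∈ stack ∨ (x ∈ ps ∧ x ∉ seen)) ∧
      (seen.Nodup → s'.Nodup) ∧
      (u ∉ seen → u ∉ s') ∧
      s'.length + stack.length = seen.length + k'.length := by
  intro ps
  induction ps with
  | nil =>
    intro seen stack s' k' h
    simp only [innerA, Option.some.injEq, Prod.mk.injEq] at h
    obtain ⟨rfl, rfl⟩ := h
    refine ⟨by simp, by simp, id, id, rfl⟩
  | cons p ps ih =>
    intro seen stack s' k' h
    simp only [innerA] at h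
    by_cases hpu : p = u
    · simp [hpu] at h
    · rw [if_neg hpu] at h
      by_cases hm : p ∈ seen
      · rw [if_pos ((PySem.Set.contains_iff _ _).mpr hm)] at h
        obtain ⟨h1, h2, h3, h4, h5⟩ := ih seen stack s' k' h
        refine ⟨?_, ?_, h3, h4, h5⟩
        · intro x
          rw [h1, List.mem_cons]
          constructor
          · rintro (hx | hx) <;> tauto
          · rintro (hx | rfl | hx) <;> tauto
        · intro x
          rw [h2, List.mem_cons]
          constructor
          · rintro (hx | hx) <;> tauto
          · rintro (hx | ⟨(rfl | hx), hns⟩) <;> tauto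
      · rw [if_neg (fun hc => hm ((PySem.Set.contains_iff _ _).mp hc)), PySem.Set.add_of_not_mem hm] at h
        obtain ⟨h1, h2, h3, h4, h5⟩ := ih (seen ++ [p]) (p :: stack) s' k' h
        refine ⟨?_, ?_, ?_, ?_, by simp at h5; omega⟩
        · intro x
          rw [h1]
          simp only [List.mem_append, List.mem_cons]
          tauto
        · intro x
          rw [h2]
          simp only [List.mem_cons, List.mem_append]
          by_cases hxp : x = p
          · subst hxp; tauto
          · tauto
        · intro hnd
          refine h3 ?_
          rw [List.nodup_append]
          refine ⟨hnd, List.nodup_singleton _, ?_⟩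
          intro a ha b hb
          simp only [List.mem_singleton] at hb
          subst hb
          exact fun he => hm (he ▸ ha)
        · intro hu
          apply h4
          intro hc
          rcases List.mem_append.mp hc with hh | hh
          · exact hu hh
          · exact hpu (List.mem_singleton.mp hh).symm

-- a state whose processed part is parent-closed and avoids u cannot reach u
lemma pvClosed_not_reach {u v : String} {parents : List (String × List String)}
    {seen : List String} (hu : u ∉ seen)
    (hcl : ∀ x, (x = v ∨ x ∈ seen) → ∀ p ∈ pvGet parents x, p ∈ seen) :
    ¬ pvReach parents v u := by
  intro h
  have key : ∀ x, pvReach parents v x → x ∈ seen := by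
    intro x hx
    induction hx with
    | single h1 => exact hcl v (Or.inl rfl) _ h1
    | tail _ h2 ih => exact hcl _ (Or.inr ih) _ h2
  exact hu (key u h)

lemma loopA_iff (u v : String) (parents : List (String × List String)) :
    ∀ fuel seen stack,
      seen.Nodup →
      (∀ x ∈ seen, x ∈ pvAllD parents) →
      (∀ x ∈ stack, x = v ∨ x ∈ seen) →
      u ∉ seen →
      (∀ x ∈ seen, pvReach parents v x) →
      (∀ x, (x = v ∨ x ∈ seen) → x ∉ stack → ∀ p ∈ pvGet parents x, p ∈ seen) →
      2 * (pvAllD parents).length + stack.length + 1 ≤ fuel + 2 * seen.length →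
      (loopA u parents fuel seen stack = true ↔ pvReach parents v u) := by
  intro fuel
  induction fuel with
  | zero =>
    intro seen stack hnd hsub hstk hu _hT hcl hfuel
    cases stack with
    | nil =>
      simp only [loopA, Bool.false_eq_true, false_iff]
      exact pvClosed_not_reach hu (fun x hx => hcl x hx (by simp))
    | cons cur rest =>
      have := pvNodup_length_le hnd hsub
      simp only [List.length_cons] at hfuel
      omega
  | succ fuel ih =>
    intro seen stack hnd hsub hstk hu hT hcl hfuel
    cases stack with
    | nil =>
      simp only [loopA, Bool.false_eq_true, false_iff]
      exact pvClosed_not_reach hu (fun x hx => hcl x hx (by simp))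
    | cons cur rest =>
      simp only [loopA]
      cases hin : innerA u (pvGet parents cur) seen rest with
      | none =>
        simp only [true_iff]
        have hedge : pvEdge parents cur u := (innerA_none_iff u _ seen rest).mp hin
        rcases hstk cur (List.mem_cons_self ..) with rfl | hc
        · exact Relation.TransGen.single hedge
        · exact Relation.TransGen.tail (hT cur hc) hedge
      | some st =>
        obtain ⟨s', k'⟩ := st
        obtain ⟨h1, h2, h3, h4, h5⟩ := innerA_some u _ seen rest s' k' hin
        have hseen_s' : ∀ x ∈ seen, x ∈ s' := fun x hx => (h1 x).mpr (Or.inl hx)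
        have hnd' : s'.Nodup := h3 hnd
        have hlen : seen.length ≤ s'.length := pvNodup_length_le hnd hseen_s'
        apply ih s' k' hnd'
        · intro x hx
          rcases (h1 x).mp hx with hx | hx
          · exact hsub x hx
          · exact mem_pvAllD hx
        · intro x hx
          rcases (h2 x).mp hx with hx | ⟨hx, _⟩
          · rcases hstk x (List.mem_cons_of_mem _ hx) with h | h
            · exact Or.inl h
            · exact Or.inr (hseen_s' x h)
          · exact Or.inr ((h1 x).mpr (Or.inr hx))
        · exact h4 hu
        · intro x hx
          rcases (h1 x).mp hx with hx | hx
          · exact hT x hx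
          · rcases hstk cur (List.mem_cons_self ..) with rfl | hc
            · exact Relation.TransGen.single hx
            · exact Relation.TransGen.tail (hT cur hc) hx
        · intro x hx hnk p hp
          by_cases hxc : x = cur
          · subst hxc
            exact (h1 p).mpr (Or.inr hp)
          · have hxseen : x = v ∨ x ∈ seen := by
              rcases hx with rfl | hx
              · exact Or.inl rfl
              · rcases (h1 x).mp hx with h | h
                · exact Or.inr h
                · by_cases hc : x ∈ seen
                  · exact Or.inr hc
                  · exact absurd ((h2 x).mpr (Or.inr ⟨h, hc⟩)) hnk
            have hxstk : x ∉ cur :: rest := by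
              intro hmem
              rcases List.mem_cons.mp hmem with h | h
              · exact hxc h
              · exact hnk ((h2 x).mpr (Or.inl h))
            exact hseen_s' p (hcl x hxseen hxstk p hp)
        · simp only [List.length_cons] at hfuel
          omega

lemma loopB_iff (u v : String) (parents : List (String × List String)) :
    ∀ fuel anc frontier,
      anc.Nodup →
      (∀ x ∈ anc, x ∈ pvAllD parents) →
      (∀ x ∈ frontier, x = v ∨ x ∈ anc) →
      (∀ x ∈ anc, pvReach parents v x) →
      (∀ x, (x = v ∨ x ∈ anc) → x ∉ frontier → ∀ p ∈ pvGet parents x, p ∈ anc) →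
      (frontier ≠ [] → (pvAllD parents).length + 1 ≤ fuel + anc.length) →
      (loopB u parents fuel anc frontier = true ↔ pvReach parents v u) := by
  intro fuel
  induction fuel with
  | zero =>
    intro anc frontier hnd hsub hfr hT hcl hfuel
    cases frontier with
    | nil =>
      simp only [loopB, PySem.Set.contains_iff]
      constructor
      · exact fun h => hT u h
      · intro h
        by_contra hu
        exact pvClosed_not_reach hu (fun x hx => hcl x hx (by simp)) h
    | cons f fs =>
      have := pvNodup_length_le hnd hsub
      have := hfuel (by simp)
      omega
  | succ fuel ih =>
    intro anc frontier hnd hsub hfr hT hcl hfuel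
    cases frontier with
    | nil =>
      simp only [loopB, PySem.Set.contains_iff]
      constructor
      · exact fun h => hT u h
      · intro h
        by_contra hu
        exact pvClosed_not_reach hu (fun x hx => hcl x hx (by simp)) h
    | cons f fs =>
      simp only [loopB]
      set ps := (f :: fs).flatMap (fun c => pvGet parents c) with hps
      set nw := PySem.Set.diff (PySem.Set.ofList ps) anc with hnw
      have hmem_nw : ∀ x, x ∈ nw ↔ ((∃ c ∈ f :: fs, x ∈ pvGet parents c) ∧ x ∉ anc) := by
        intro x
        rw [hnw, PySem.Set.mem_diff, PySem.Set.mem_ofList, hps, List.mem_flatMap]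
      have hnd_nw : nw.Nodup := PySem.Set.nodup_diff (PySem.Set.ofList ps) anc (PySem.Set.nodup_ofList ps)
      have hdisj : ∀ x ∈ nw, x ∉ anc := fun x hx => ((hmem_nw x).mp hx).2
      have hupd : PySem.Set.update anc nw = anc ++ nw :=
        PySem.Set.update_eq_append_of_disjoint anc nw hnd_nw hdisj
      have hmem_anc' : ∀ x, x ∈ PySem.Set.update anc nw ↔ x ∈ anc ∨ x ∈ nw := by
        intro x; rw [hupd, List.mem_append]
      have hT' : ∀ x ∈ PySem.Set.update anc nw, pvReach parents v x := by
        intro x hx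
        rcases (hmem_anc' x).mp hx with hx | hx
        · exact hT x hx
        · obtain ⟨⟨c, hc, hedge⟩, _⟩ := (hmem_nw x).mp hx
          rcases hfr c hc with rfl | hc'
          · exact Relation.TransGen.single hedge
          · exact Relation.TransGen.tail (hT c hc') hedge
      apply ih
      · exact PySem.Set.nodup_update anc nw hnd
      · intro x hx
        rcases (hmem_anc' x).mp hx with hx | hx
        · exact hsub x hx
        · obtain ⟨⟨c, _, hedge⟩, _⟩ := (hmem_nw x).mp hx
          exact mem_pvAllD hedge
      · intro x hx
        exact Or.inr ((hmem_anc' x).mpr (Or.inr hx))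
      · exact hT'
      · intro x hx hnx p hp
        by_cases hxf : x ∈ f :: fs
        · -- x was just expanded: its parents are all in anc ∪ nw
          apply (hmem_anc' p).mpr
          by_cases hpa : p ∈ anc
          · exact Or.inl hpa
          · exact Or.inr ((hmem_nw p).mpr ⟨⟨x, hxf, hp⟩, hpa⟩)
        · have hxanc : x = v ∨ x ∈ anc := by
            rcases hx with rfl | hx
            · exact Or.inl rfl
            · rcases (hmem_anc' x).mp hx with h | h
              · exact Or.inr h
              · exact absurd h hnx
          exact (hmem_anc' p).mpr (Or.inl (hcl x hxanc hxf p hp))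
      · intro hne
        have hnw_ne : nw ≠ [] := hne
        have : 1 ≤ nw.length := by
          cases hnwc : nw with
          | nil => exact absurd hnwc hnw_ne
          | cons a l => simp
        have hlen' : (PySem.Set.update anc nw).length = anc.length + nw.length := by
          rw [hupd, List.length_append]
        have := hfuel (by simp)
        omega

-- ===== VERDICT (by name: the statement is the Claim_ definition above) =====
theorem is_upstream_py_spec : Claim_equal_is_upstream_py := by
  intro u v parents _dom
  unfold Spec_is_upstream_py is_upstream_py is_upstream_py_alt
  rw [Bool.eq_iff_iff]
  have hA := loopA_iff u v parents (2 * (pvAllD parents).length + 2) [] [v]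
    (by simp) (by simp) (by simp) (by simp) (by simp)
    (by
      rintro x hx hnx
      rcases hx with rfl | hx
      · exact absurd (List.mem_singleton_self _) hnx
      · cases hx)
    (by simp)
  have hB := loopB_iff u v parents ((pvAllD parents).length + 1) [] [v]
    (by simp) (by simp) (by simp) (by simp)
    (by
      rintro x hx hnx
      rcases hx with rfl | hx
      · exact absurd (List.mem_singleton_self _) hnx
      · cases hx)
    (by intro _; simp)
  exact hA.trans hB.symm
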